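-- pv_equiv track=rewrite | github.com/intel/neural-compressor | neural_compressor/torch/utils/utility.py | validate_modules
-- ===== SOURCE A (Python) =====
-- def validate_modules(module_names):  # pragma: no cover
--     """Test a list of modules' validity.
--
--     Args:
--     modules (list of str): List of strings to be validated.
--
--     Returns:
--     bool: True if all modules have equal length or not dependent, otherwise False.
--     """
--     if not bool(module_names):
--         raise ValueError("Empty modules")
--     if len(module_names) < 2:
--         return True
--     split_modules = [s.split(".") for s, _ in module_names]
--     lengths = [len(parts) for parts in split_modules]
--     if len(set(lengths)) == 1:
--         return True
--     max_length = max(lengths)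
--     min_length = min(lengths)
--     longest_module = next(s for s in split_modules if len(s) == max_length)
--     shortest_module = next(s for s in split_modules if len(s) == min_length)
--     shortest_module = ".".join(shortest_module)
--     longest_module = ".".join(longest_module)
--     # Check if the shortest name is a substring of the longest name
--     if shortest_module in longest_module:
--         raise ValueError(
--             "Invalid modules, at least two modules detected" " as dependent, {shortest_module} and {longest_module}"
--         )
--     return True
-- ===== SOURCE B (Python) =====
-- def validate_modules(module_names):
--     """Single-pass validation: one loop tracks the first dot-count, an all-equal flag,
--     and the first-longest / first-shortest module names (strict updates keep first occurrence)."""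
--     if not module_names:
--         raise ValueError("Empty modules")
--     if len(module_names) < 2:
--         return True
--     s0 = module_names[0][0]
--     n0 = s0.count(".") + 1
--     all_equal = True
--     longest, max_n = s0, n0
--     shortest, min_n = s0, n0
--     for s, _ in module_names[1:]:
--         n = s.count(".") + 1
--         if n != n0:
--             all_equal = False
--         if n > max_n:
--             longest, max_n = s, n
--         if n < min_n:
--             shortest, min_n = s, n
--     if all_equal:
--         return True
--     if shortest in longest:
--         raise ValueError(
--             "Invalid modules, at least two modules detected" " as dependent, {shortest_module} and {longest_module}"
--         )
--     return True
-- ===== Notes on version B (the rewrite author's own statement) =====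
-- stated objective: alternative
-- what changed: A splits every name, builds a lengths list and a set of lengths, calls max and min, rescans twice for the first longest/shortest split and re-joins them; B makes one pass over the names, computing each dot-count directly with s.count('.')+1 and maintaining an all-equal flag plus the first-longest and first-shortest original strings.
import Mathlib
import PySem

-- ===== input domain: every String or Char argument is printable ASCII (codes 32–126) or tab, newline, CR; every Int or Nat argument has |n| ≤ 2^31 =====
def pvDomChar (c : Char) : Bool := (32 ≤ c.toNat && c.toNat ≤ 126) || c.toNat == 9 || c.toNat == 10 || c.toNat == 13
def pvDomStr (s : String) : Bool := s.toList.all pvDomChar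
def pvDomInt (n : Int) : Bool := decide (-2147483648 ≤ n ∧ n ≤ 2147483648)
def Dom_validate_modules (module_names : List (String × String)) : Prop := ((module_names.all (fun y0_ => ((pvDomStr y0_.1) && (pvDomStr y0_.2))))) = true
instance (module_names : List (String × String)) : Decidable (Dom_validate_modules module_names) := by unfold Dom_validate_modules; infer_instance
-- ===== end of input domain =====

-- B replaces A's many passes (split every name, a lengths list, a set of lengths, max, min, two
-- linear scans, joins) by ONE loop over the names that tracks the first dot-count, an all-equal
-- flag and the first-longest / first-shortest original strings (objective: alternative).
-- Equality proved is about return values; where Python A raises ValueError (empty input, or a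
-- dependent pair of names), B raises the same ValueError, both ports return false, and those
-- inputs are excluded by Pre_validate_modules.

-- ===== PORT A =====
-- A's `s.split(".")`: sep "." is nonempty, so PySem.Str.split? is always `some`; `.getD []` unwraps.
-- A's `next(s for s in … if …)` always succeeds when reached; ported as `find? … |>.getD []`.
def validate_modules (module_names : List (String × String)) : Bool :=
  if module_names = [] then false  -- raise ValueError("Empty modules")
  else if module_names.length < 2 then true
  else
    let split_modules : List (List String) :=
      module_names.map (fun p => (PySem.Str.split? p.1 ".").getD [])
    let lengths : List Nat := split_modules.map (fun parts => parts.length)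
    if PySem.Set.len (PySem.Set.ofList lengths) == 1 then true
    else
      let max_length : Nat := (PySem.List.max? lengths (fun x => x)).getD 0
      let min_length : Nat := (PySem.List.min? lengths (fun x => x)).getD 0
      let longest_module : List String :=
        (split_modules.find? (fun s => s.length == max_length)).getD []
      let shortest_module : List String :=
        (split_modules.find? (fun s => s.length == min_length)).getD []
      let shortest_module' : String := PySem.Str.join "." shortest_module
      let longest_module' : String := PySem.Str.join "." longest_module
      if PySem.Str.isIn shortest_module' longest_module' then false  -- raise ValueError(…)
      else true

-- ===== PORT B =====
structure PvScan where
  allEq : Bool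
  longest : String
  maxN : Nat
  shortest : String
  minN : Nat
deriving Repr, DecidableEq

def validate_modules_alt (module_names : List (String × String)) : Bool :=
  match module_names with
  | [] => false  -- raise ValueError("Empty modules")
  | p0 :: rest =>
    if (p0 :: rest).length < 2 then true
    else
      let s0 := p0.1
      let n0 := PySem.Str.count s0 "." + 1
      let st := rest.foldl (fun (st : PvScan) p =>
          let n := PySem.Str.count p.1 "." + 1
          let st := if n ≠ n0 then { st with allEq := false } else st
          let st := if st.maxN < n then { st with longest := p.1, maxN := n } else st
          if n < st.minN then { st with shortest := p.1, minN := n } else st)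
        ⟨true, s0, n0, s0, n0⟩
      if st.allEq then true
      else if PySem.Str.isIn st.shortest st.longest then false  -- raise ValueError(…)
      else true

-- ===== PRECONDITION & SPEC =====
-- helpers for Pre_ only: dot count, running max/min dot count, first name attaining them
def pvDots (s : String) : Nat := PySem.Str.count s "."
def pvMaxD (mn : List (String × String)) : Nat :=
  match mn with
  | [] => 0
  | p :: rest => rest.foldl (fun m q => Nat.max m (pvDots q.1)) (pvDots p.1)
def pvMinD (mn : List (String × String)) : Nat :=
  match mn with
  | [] => 0
  | p :: rest => rest.foldl (fun m q => Nat.min m (pvDots q.1)) (pvDots p.1)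
def pvLongest (mn : List (String × String)) : String :=
  ((mn.find? (fun p => pvDots p.1 == pvMaxD mn)).getD ("", "")).1
def pvShortest (mn : List (String × String)) : String :=
  ((mn.find? (fun p => pvDots p.1 == pvMinD mn)).getD ("", "")).1

-- Pre_ excludes exactly the inputs where Python A raises ValueError (and returns nothing): the
-- empty list, and lists of ≥ 2 names with unequal dot-counts whose first-shortest name is a
-- substring of the first-longest name.
def Pre_validate_modules (module_names : List (String × String)) : Prop :=
  module_names ≠ [] ∧
  (module_names.length < 2 ∨
   (∀ p ∈ module_names, pvDots p.1 = pvDots ((module_names.headD ("", "")).1)) ∨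
   PySem.Str.isIn (pvShortest module_names) (pvLongest module_names) = false)
instance (module_names : List (String × String)) : Decidable (Pre_validate_modules module_names) := by
  unfold Pre_validate_modules; infer_instance

def pvWitness_validate_modules : (List (String × String)) := [("a.b", "x"), ("cd", "y")]

def Spec_validate_modules (module_names : List (String × String)) (out : Bool) : Prop := out = validate_modules_alt module_names
instance (module_names : List (String × String)) (out : Bool) : Decidable (Spec_validate_modules module_names out) := by unfold Spec_validate_modules; infer_instance

-- ===== CLAIM (what is proved, stated in full; the proofs are below) =====
def Claim_equal_validate_modules : Prop := ∀ (module_names : List (String × String)), Dom_validate_modules module_names → Pre_validate_modules module_names → Spec_validate_modules module_names (validate_modules module_names)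

-- ===== LEMMAS AND PROOFS =====

theorem pv_count_go_char (c : Char) (l : List Char) : ∀ (fuel acc : Nat), l.length ≤ fuel →
    PySem.Chars.count.go [c] fuel l acc = acc + l.count c := by
  induction l with
  | nil => intro fuel acc h; cases fuel <;> simp [PySem.Chars.count.go]
  | cons a t ih =>
    intro fuel acc h
    cases fuel with
    | zero => simp at h
    | succ f =>
      have ht : t.length ≤ f := by simpa using h
      by_cases hca : c = a
      · subst hca
        simp [PySem.Chars.count.go, List.isPrefixOf, ih f (acc+1) ht]
        omega
      · have : (a == c) = false := by simp [Ne.symm hca]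
        simp [PySem.Chars.count.go, List.isPrefixOf, Ne.symm hca, hca, ih f acc ht]

theorem pv_count_char (c : Char) (s : List Char) : PySem.Chars.count s [c] = s.count c := by
  simp [PySem.Chars.count, pv_count_go_char c s s.length 0 le_rfl]

theorem pv_modifyHead_id {α : Type} (l : List α) : List.modifyHead (fun x => x) l = l := by
  cases l <;> simp

theorem pv_splitOn_go_char (c : Char) (l : List Char) : ∀ (fuel : Nat) (cur : List Char) (acc : List (List Char)),
    l.length < fuel →
    PySem.Chars.splitOn.go [c] fuel l cur acc
      = acc.reverse ++ (List.splitOn c l).modifyHead (fun x => cur.reverse ++ x) := by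
  induction l with
  | nil =>
    intro fuel cur acc h
    cases fuel with
    | zero => simp at h
    | succ f => simp [PySem.Chars.splitOn.go, List.splitOn, List.splitOnP_nil]
  | cons a t ih =>
    intro fuel cur acc h
    cases fuel with
    | zero => simp at h
    | succ f =>
      have ht : t.length < f := by simpa using h
      by_cases hca : c = a
      · subst hca
        simp [PySem.Chars.splitOn.go, List.isPrefixOf, ih f [] (cur.reverse :: acc) ht,
              List.splitOn, List.splitOnP_cons, pv_modifyHead_id]
      · have hba : (a == c) = false := by simp [Ne.symm hca]
        have hstep : PySem.Chars.splitOn.go [c] (f+1) (a :: t) cur acc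
            = PySem.Chars.splitOn.go [c] f t (a :: cur) acc := by
          simp [PySem.Chars.splitOn.go, List.isPrefixOf, hca]
        rw [hstep, ih f (a :: cur) acc ht]
        have hsp : List.splitOn c (a :: t) = List.modifyHead (List.cons a) (List.splitOn c t) := by
          simp [List.splitOn, List.splitOnP_cons, hba]
        have hfun : (fun x : List Char => (a :: cur).reverse ++ x)
            = ((fun x => cur.reverse ++ x) ∘ List.cons a) := by
          funext x; simp
        rw [hsp, List.modifyHead_modifyHead, hfun]

theorem pv_splitOn_char (c : Char) (s : List Char) :
    PySem.Chars.splitOn s [c] = List.splitOn c s := by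
  have := pv_splitOn_go_char c s (s.length + 1) [] [] (by omega)
  simpa [PySem.Chars.splitOn, pv_modifyHead_id] using this

theorem pv_length_splitOn (c : Char) (l : List Char) :
    (List.splitOn c l).length = l.count c + 1 := by
  unfold List.splitOn
  induction l with
  | nil => simp [List.splitOnP_nil]
  | cons a t ih =>
    by_cases hac : a = c
    · simp [List.splitOnP_cons, hac, ih]
    · simp [List.splitOnP_cons, hac, List.length_modifyHead, ih]

def pvG (p : String × String) : Nat := PySem.Str.count p.1 "." + 1

theorem pv_split_length (p : String × String) :
    ((PySem.Str.split? p.1 ".").getD []).length = pvG p := by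
  simp [PySem.Str.split?, PySem.Chars.split?, pvG, PySem.Str.count_eq,
        pv_splitOn_char, pv_length_splitOn, pv_count_char,
        show ".".toList = ['.'] from rfl]

theorem pv_join_split (s : String) :
    PySem.Str.join "." ((PySem.Str.split? s ".").getD []) = s := by
  simp [PySem.Str.join, PySem.Str.split?, PySem.Chars.split?, PySem.Chars.join,
        pv_splitOn_char, List.map_map, show ".".toList = ['.'] from rfl]
  have hto : (String.toList ∘ String.ofList) = id := by funext l; simp
  rw [hto, List.map_id, List.intercalate_splitOn]
  simp

theorem pv_set_len_one (x : Nat) (xs : List Nat) :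
    (PySem.Set.len (PySem.Set.ofList (x :: xs)) == 1) = xs.all (fun y => y == x) := by
  rw [Bool.eq_iff_iff]
  simp only [beq_iff_eq, List.all_eq_true, PySem.Set.len]
  constructor
  · intro h y hy
    have hlen : (PySem.Set.ofList (x :: xs)).length = 1 := by exact_mod_cast h
    obtain ⟨z, hz⟩ := List.length_eq_one_iff.mp hlen
    have hx : x ∈ PySem.Set.ofList (x :: xs) := (PySem.Set.mem_ofList _ _).mpr (by simp)
    have hyy : y ∈ PySem.Set.ofList (x :: xs) := (PySem.Set.mem_ofList _ _).mpr (by simp [hy])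
    rw [hz] at hx hyy
    simp at hx hyy
    rw [hyy, hx]
  · intro h
    have : PySem.Set.ofList (x :: xs) = [x] := by
      have aux : ∀ (l : List Nat), (∀ y ∈ l, y = x) → List.foldl PySem.Set.add [x] l = [x] := by
        intro l
        induction l with
        | nil => intro _; rfl
        | cons a t iht =>
          intro ha
          have : PySem.Set.add [x] a = [x] := by
            have : a = x := ha a (by simp)
            simp [PySem.Set.add, this, PySem.Set.contains]
          simpa [this] using iht (fun y hy => ha y (by simp [hy]))
      have : List.foldl PySem.Set.add (PySem.Set.add PySem.Set.empty x) xs = [x] := by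
        simpa [PySem.Set.add, PySem.Set.empty, PySem.Set.contains] using aux xs h
      simpa [PySem.Set.ofList] using this
    simp [this]

theorem pv_foldmax_cases (g : String × String → Nat) (l : List (String × String)) :
    ∀ (m : Nat), l.foldl (fun m p => Nat.max m (g p)) m = m ∨
      ∃ q ∈ l, l.foldl (fun m p => Nat.max m (g p)) m = g q := by
  induction l with
  | nil => intro m; left; rfl
  | cons p t ih =>
    intro m
    rcases ih (Nat.max m (g p)) with h | ⟨q, hq, hq2⟩
    · rcases max_choice m (g p) with hm | hm
      · left; simpa [hm] using h
      · right; exact ⟨p, by simp, by simpa [hm] using h⟩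
    · right; exact ⟨q, by simp [hq], by simpa using hq2⟩

theorem pv_foldmax_le_init (g : String × String → Nat) (l : List (String × String)) :
    ∀ (m : Nat), m ≤ l.foldl (fun m p => Nat.max m (g p)) m := by
  induction l with
  | nil => intro m; simp
  | cons p t ih =>
    intro m
    calc m ≤ Nat.max m (g p) := Nat.le_max_left _ _
    _ ≤ _ := ih _

theorem pv_foldmin_cases (g : String × String → Nat) (l : List (String × String)) :
    ∀ (m : Nat), l.foldl (fun m p => Nat.min m (g p)) m = m ∨
      ∃ q ∈ l, l.foldl (fun m p => Nat.min m (g p)) m = g q := by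
  induction l with
  | nil => intro m; left; rfl
  | cons p t ih =>
    intro m
    rcases ih (Nat.min m (g p)) with h | ⟨q, hq, hq2⟩
    · rcases min_choice m (g p) with hm | hm
      · left; simpa [hm] using h
      · right; exact ⟨p, by simp, by simpa [hm] using h⟩
    · right; exact ⟨q, by simp [hq], by simpa using hq2⟩

theorem pv_foldmin_le_init (g : String × String → Nat) (l : List (String × String)) :
    ∀ (m : Nat), l.foldl (fun m p => Nat.min m (g p)) m ≤ m := by
  induction l with
  | nil => intro m; simp
  | cons p t ih =>
    intro m
    exact le_trans (ih _) (Nat.min_le_left _ _)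

theorem pv_max?_id (xs : List Nat) : ∀ (x : Nat),
    PySem.List.max? (x :: xs) (fun v => v) = some (xs.foldl Nat.max x) := by
  induction xs with
  | nil => intro x; rfl
  | cons y ys ih =>
    intro x
    have h1 : PySem.List.max? (x :: y :: ys) (fun v => v)
        = PySem.List.max? (Nat.max x y :: ys) (fun v => v) := by
      simp only [PySem.List.max?, List.foldl_cons]
      congr 1
      by_cases h : x < y <;> simp [h, Nat.max_def] <;> omega
    rw [h1, ih (Nat.max x y)]
    simp

theorem pv_min?_id (xs : List Nat) : ∀ (x : Nat),
    PySem.List.min? (x :: xs) (fun v => v) = some (xs.foldl Nat.min x) := by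
  induction xs with
  | nil => intro x; rfl
  | cons y ys ih =>
    intro x
    have h1 : PySem.List.min? (x :: y :: ys) (fun v => v)
        = PySem.List.min? (Nat.min x y :: ys) (fun v => v) := by
      simp only [PySem.List.min?, List.foldl_cons]
      congr 1
      by_cases h : y < x <;> simp [h, Nat.min_def] <;> omega
    rw [h1, ih (Nat.min x y)]
    simp

def pvFMax (g : String × String → Nat) (l : List (String × String)) (a : String × String) : Nat :=
  l.foldl (fun m p => Nat.max m (g p)) (g a)
def pvFMin (g : String × String → Nat) (l : List (String × String)) (a : String × String) : Nat :=
  l.foldl (fun m p => Nat.min m (g p)) (g a)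

theorem pv_fmax_attained (g : String × String → Nat) (l : List (String × String)) (a : String × String) :
    ∃ q ∈ a :: l, g q = pvFMax g l a := by
  rcases pv_foldmax_cases g l (g a) with h | ⟨q, hq, hq2⟩
  · exact ⟨a, by simp, h.symm⟩
  · exact ⟨q, by simp [hq], hq2.symm⟩

theorem pv_fmin_attained (g : String × String → Nat) (l : List (String × String)) (a : String × String) :
    ∃ q ∈ a :: l, g q = pvFMin g l a := by
  rcases pv_foldmin_cases g l (g a) with h | ⟨q, hq, hq2⟩
  · exact ⟨a, by simp, h.symm⟩
  · exact ⟨q, by simp [hq], hq2.symm⟩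

theorem pv_foldl_firstmax (g : String × String → Nat) (l : List (String × String)) :
    ∀ (a : String × String),
    l.foldl (fun (q : String × Nat) p => if q.2 < g p then (p.1, g p) else q) (a.1, g a)
      = ((((a :: l).find? (fun p => g p == pvFMax g l a)).getD a).1, pvFMax g l a) := by
  induction l with
  | nil => intro a; simp [pvFMax]
  | cons p t ih =>
    intro a
    by_cases h : g a < g p
    · have hmx : Nat.max (g a) (g p) = g p := Nat.max_eq_right (Nat.le_of_lt h)
      have hM : pvFMax g (p :: t) a = pvFMax g t p := by
        simp [pvFMax, hmx]
      have hstep : (if (a.1, g a).2 < g p then (p.1, g p) else (a.1, g a)) = (p.1, g p) := by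
        simp [h]
      rw [List.foldl_cons, hstep, ih p, hM]
      have hbound : g p ≤ pvFMax g t p := pv_foldmax_le_init g t (g p)
      have haM : ¬ g a = pvFMax g t p := by omega
      conv_rhs => rw [List.find?_cons_of_neg (by simpa using haM)]
      obtain ⟨q, hq, hq2⟩ := pv_fmax_attained g t p
      cases hf : (p :: t).find? (fun q => g q == pvFMax g t p) with
      | none =>
        exact absurd (by simpa using hq2)
          (by simpa using List.find?_eq_none.mp hf q hq)
      | some r => simp
    · have hpa : g p ≤ g a := Nat.not_lt.mp h
      have hmx : Nat.max (g a) (g p) = g a := Nat.max_eq_left hpa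
      have hM : pvFMax g (p :: t) a = pvFMax g t a := by
        simp [pvFMax, hmx]
      have hstep : (if (a.1, g a).2 < g p then (p.1, g p) else (a.1, g a)) = (a.1, g a) := by
        simp [h]
      rw [List.foldl_cons, hstep, ih a, hM]
      have hbound : g a ≤ pvFMax g t a := pv_foldmax_le_init g t (g a)
      by_cases hA : g a = pvFMax g t a
      · conv_lhs => rw [List.find?_cons_of_pos (by simpa using hA)]
        conv_rhs => rw [List.find?_cons_of_pos (by simpa using hA)]
      · have hpM : ¬ g p = pvFMax g t a := by omega
        conv_lhs => rw [List.find?_cons_of_neg (by simpa using hA)]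
        conv_rhs => rw [List.find?_cons_of_neg (by simpa using hA),
                        List.find?_cons_of_neg (by simpa using hpM)]

theorem pv_foldl_firstmin (g : String × String → Nat) (l : List (String × String)) :
    ∀ (a : String × String),
    l.foldl (fun (q : String × Nat) p => if g p < q.2 then (p.1, g p) else q) (a.1, g a)
      = ((((a :: l).find? (fun p => g p == pvFMin g l a)).getD a).1, pvFMin g l a) := by
  induction l with
  | nil => intro a; simp [pvFMin]
  | cons p t ih =>
    intro a
    by_cases h : g p < g a
    · have hmn : Nat.min (g a) (g p) = g p := Nat.min_eq_right (Nat.le_of_lt h)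
      have hM : pvFMin g (p :: t) a = pvFMin g t p := by
        simp [pvFMin, hmn]
      have hstep : (if g p < (a.1, g a).2 then (p.1, g p) else (a.1, g a)) = (p.1, g p) := by
        simp [h]
      rw [List.foldl_cons, hstep, ih p, hM]
      have hbound : pvFMin g t p ≤ g p := pv_foldmin_le_init g t (g p)
      have haM : ¬ g a = pvFMin g t p := by omega
      conv_rhs => rw [List.find?_cons_of_neg (by simpa using haM)]
      obtain ⟨q, hq, hq2⟩ := pv_fmin_attained g t p
      cases hf : (p :: t).find? (fun q => g q == pvFMin g t p) with
      | none =>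
        exact absurd (by simpa using hq2)
          (by simpa using List.find?_eq_none.mp hf q hq)
      | some r => simp
    · have hpa : g a ≤ g p := Nat.not_lt.mp h
      have hmn : Nat.min (g a) (g p) = g a := Nat.min_eq_left hpa
      have hM : pvFMin g (p :: t) a = pvFMin g t a := by
        simp [pvFMin, hmn]
      have hstep : (if g p < (a.1, g a).2 then (p.1, g p) else (a.1, g a)) = (a.1, g a) := by
        simp [h]
      rw [List.foldl_cons, hstep, ih a, hM]
      have hbound : pvFMin g t a ≤ g a := pv_foldmin_le_init g t (g a)
      by_cases hA : g a = pvFMin g t a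
      · conv_lhs => rw [List.find?_cons_of_pos (by simpa using hA)]
        conv_rhs => rw [List.find?_cons_of_pos (by simpa using hA)]
      · have hpM : ¬ g p = pvFMin g t a := by omega
        conv_lhs => rw [List.find?_cons_of_neg (by simpa using hA)]
        conv_rhs => rw [List.find?_cons_of_neg (by simpa using hA),
                        List.find?_cons_of_neg (by simpa using hpM)]



theorem pv_scan_step (n0 : Nat) :
    (fun (st : PvScan) (p : String × String) =>
        let n := PySem.Str.count p.1 "." + 1
        let st := if n ≠ n0 then { st with allEq := false } else st
        let st := if st.maxN < n then { st with longest := p.1, maxN := n } else st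
        if n < st.minN then { st with shortest := p.1, minN := n } else st)
    = (fun (st : PvScan) (p : String × String) =>
        ⟨st.allEq && (pvG p == n0),
         (if st.maxN < pvG p then (p.1, pvG p) else (st.longest, st.maxN)).1,
         (if st.maxN < pvG p then (p.1, pvG p) else (st.longest, st.maxN)).2,
         (if pvG p < st.minN then (p.1, pvG p) else (st.shortest, st.minN)).1,
         (if pvG p < st.minN then (p.1, pvG p) else (st.shortest, st.minN)).2⟩) := by
  funext st p
  dsimp only [pvG]
  split_ifs <;> simp_all

theorem pv_scan_decomp (n0 : Nat) (l : List (String × String)) : ∀ (st : PvScan),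
    l.foldl (fun (st : PvScan) p =>
        let n := PySem.Str.count p.1 "." + 1
        let st := if n ≠ n0 then { st with allEq := false } else st
        let st := if st.maxN < n then { st with longest := p.1, maxN := n } else st
        if n < st.minN then { st with shortest := p.1, minN := n } else st) st
    = ⟨st.allEq && l.all (fun p => pvG p == n0),
       (l.foldl (fun (q : String × Nat) p => if q.2 < pvG p then (p.1, pvG p) else q) (st.longest, st.maxN)).1,
       (l.foldl (fun (q : String × Nat) p => if q.2 < pvG p then (p.1, pvG p) else q) (st.longest, st.maxN)).2,
       (l.foldl (fun (q : String × Nat) p => if pvG p < q.2 then (p.1, pvG p) else q) (st.shortest, st.minN)).1,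
       (l.foldl (fun (q : String × Nat) p => if pvG p < q.2 then (p.1, pvG p) else q) (st.shortest, st.minN)).2⟩ := by
  rw [pv_scan_step]
  induction l with
  | nil => intro st; simp
  | cons p t ih =>
    intro st
    rw [List.foldl_cons, ih]
    rw [List.foldl_cons, List.foldl_cons, List.all_cons]
    simp [Bool.and_assoc]

set_option maxHeartbeats 2000000 in
theorem pv_ports_agree (mn : List (String × String)) :
    validate_modules mn = validate_modules_alt mn := by
  match mn with
  | [] => rfl
  | [p0] => rfl
  | p0 :: p1 :: rest =>
    have hne : ¬ (p0 :: p1 :: rest = ([] : List (String × String))) := by simp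
    have hlen2 : ¬ ((p0 :: p1 :: rest).length < 2) := by simp
    obtain ⟨qM, hqM⟩ : ∃ qM, (p0 :: p1 :: rest).find?
        (fun p => pvG p == pvFMax pvG (p1 :: rest) p0) = some qM := by
      obtain ⟨q, hq, hq2⟩ := pv_fmax_attained pvG (p1 :: rest) p0
      cases hf : (p0 :: p1 :: rest).find? (fun p => pvG p == pvFMax pvG (p1 :: rest) p0) with
      | none => exact absurd (by simpa using hq2) (by simpa using List.find?_eq_none.mp hf q hq)
      | some r => exact ⟨r, rfl⟩
    obtain ⟨qm, hqm⟩ : ∃ qm, (p0 :: p1 :: rest).find?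
        (fun p => pvG p == pvFMin pvG (p1 :: rest) p0) = some qm := by
      obtain ⟨q, hq, hq2⟩ := pv_fmin_attained pvG (p1 :: rest) p0
      cases hf : (p0 :: p1 :: rest).find? (fun p => pvG p == pvFMin pvG (p1 :: rest) p0) with
      | none => exact absurd (by simpa using hq2) (by simpa using List.find?_eq_none.mp hf q hq)
      | some r => exact ⟨r, rfl⟩
    have hA : validate_modules (p0 :: p1 :: rest)
        = (if (p1 :: rest).all (fun p => pvG p == pvG p0) then true
           else if PySem.Str.isIn qm.1 qM.1 then false else true) := by
      simp only [validate_modules]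
      rw [if_neg hne, if_neg hlen2]
      rw [List.find?_map, List.find?_map]
      have hpred : ∀ (k : Nat),
          ((fun s : List String => s.length == k) ∘ (fun p : String × String => (PySem.Str.split? p.1 ".").getD []))
            = (fun p : String × String => pvG p == k) := by
        intro k; funext p; simp [Function.comp, pv_split_length p]
      rw [hpred, hpred]
      rw [List.map_map]
      have hlg : ((fun parts : List String => parts.length) ∘ (fun p : String × String => (PySem.Str.split? p.1 ".").getD [])) = pvG := by
        funext p; exact pv_split_length p
      rw [hlg, List.map_cons, pv_set_len_one, List.all_map]
      rw [show ((fun y => y == pvG p0) ∘ pvG) = (fun p : String × String => pvG p == pvG p0) from rfl]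
      rw [pv_max?_id, pv_min?_id]
      simp only [Option.getD_some]
      rw [List.foldl_map, List.foldl_map]
      simp only [show (List.foldl (fun x y => Nat.max x (pvG y)) (pvG p0) (p1 :: rest)) = pvFMax pvG (p1 :: rest) p0 from rfl,
                 show (List.foldl (fun x y => Nat.min x (pvG y)) (pvG p0) (p1 :: rest)) = pvFMin pvG (p1 :: rest) p0 from rfl]
      rw [hqM, hqm]
      simp only [Option.map_some, Option.getD_some, pv_join_split]
    have hB : validate_modules_alt (p0 :: p1 :: rest)
        = (if (p1 :: rest).all (fun p => pvG p == pvG p0) then true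
           else if PySem.Str.isIn qm.1 qM.1 then false else true) := by
      have hB0 : validate_modules_alt (p0 :: p1 :: rest)
          = (if ((p0 :: p1 :: rest).length < 2) then true
             else
              (fun st : PvScan => if st.allEq then true else if PySem.Str.isIn st.shortest st.longest then false else true)
              ((p1 :: rest).foldl (fun (st : PvScan) p =>
                  let n := PySem.Str.count p.1 "." + 1
                  let st := if n ≠ (PySem.Str.count p0.1 "." + 1) then { st with allEq := false } else st
                  let st := if st.maxN < n then { st with longest := p.1, maxN := n } else st
                  if n < st.minN then { st with shortest := p.1, minN := n } else st)
                ⟨true, p0.1, PySem.Str.count p0.1 "." + 1, p0.1, PySem.Str.count p0.1 "." + 1⟩)) := rfl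
      rw [hB0, if_neg hlen2]
      rw [pv_scan_decomp (PySem.Str.count p0.1 "." + 1) (p1 :: rest)]
      dsimp only []
      simp only [show PySem.Str.count p0.1 "." + 1 = pvG p0 from rfl]
      rw [pv_foldl_firstmax pvG (p1 :: rest) p0, pv_foldl_firstmin pvG (p1 :: rest) p0]
      rw [hqM, hqm]
      simp only [Option.getD_some, Bool.true_and]
      rfl
    rw [hA, hB]

-- ===== VERDICT (by name: the statement is the Claim_ definition above) =====
theorem validate_modules_spec : Claim_equal_validate_modules := by
  intro mn _ _
  unfold Spec_validate_modules
  exact pv_ports_agree mn
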